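-- pv_equiv track=rewrite | github.com/amanda-matthes/Testbench-Generator-for-SystemVerilog-Modules | tbgenerator.py | getInputsAndOutputs
-- ===== SOURCE A (Python) =====
-- def getInputsAndOutputs (portlist):
--     portlist = portlist + ','
--     inputs = []                 # array of strings
--     outputs = []                # array of strings
--     temp = ""
--     inputTag = True             # boolean True = input False = output
--     for char in portlist:
--         if (temp == "inputwire"):
--             inputTag = True
--             temp = ""
--         if (temp == "outputreg"):
--             inputTag = False
--             temp = ""
--         if (char == ','):
--             if (inputTag == True):
--                 inputs.append(temp)
--                 temp = ""
--             if (inputTag == False):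
--                 outputs.append(temp)
--                 temp = ""
--         if ((char != ' ') and (char != '\n') and (char != '\t') and (char != ',')):
--             temp = temp + char
--         if (char == ']'):
--             temp = temp + " "
--
--     return [inputs, outputs]
-- ===== SOURCE B (Python) =====
-- def getInputsAndOutputs(portlist):
--     # split on ',' first, then process each comma-terminated segment;
--     # the inputwire/outputreg tag is sticky across segments
--     inputs = []
--     outputs = []
--     inputTag = True
--     for segment in portlist.split(','):
--         temp = ""
--         for char in segment:
--             if temp == "inputwire":
--                 inputTag = True
--                 temp = ""
--             if temp == "outputreg":
--                 inputTag = False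
--                 temp = ""
--             if char != ' ' and char != '\n' and char != '\t':
--                 temp = temp + char
--             if char == ']':
--                 temp = temp + " "
--         # the terminating comma of this segment triggers the reset check too
--         if temp == "inputwire":
--             inputTag = True
--             temp = ""
--         if temp == "outputreg":
--             inputTag = False
--             temp = ""
--         if inputTag:
--             inputs.append(temp)
--         else:
--             outputs.append(temp)
--     return [inputs, outputs]
-- ===== Notes on version B (the rewrite author's own statement) =====
-- stated objective: alternative
-- what changed: B first splits the port list at commas and then processes each comma-terminated segment with a nested character loop and a sticky input/output tag, instead of A's single character loop that detects commas inline.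
import Mathlib
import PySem

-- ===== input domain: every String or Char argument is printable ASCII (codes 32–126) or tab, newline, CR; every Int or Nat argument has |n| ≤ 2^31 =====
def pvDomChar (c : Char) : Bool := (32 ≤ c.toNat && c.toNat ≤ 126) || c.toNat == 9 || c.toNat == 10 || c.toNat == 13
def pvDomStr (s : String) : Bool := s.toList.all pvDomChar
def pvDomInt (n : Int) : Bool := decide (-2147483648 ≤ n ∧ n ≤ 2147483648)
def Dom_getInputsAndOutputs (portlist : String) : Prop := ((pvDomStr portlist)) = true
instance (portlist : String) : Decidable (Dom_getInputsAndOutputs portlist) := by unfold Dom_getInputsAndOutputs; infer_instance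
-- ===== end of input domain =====

-- B splits the port list at commas first and processes each comma-terminated segment with the
-- same character logic (a different decomposition, not faster); return values agree everywhere.

-- ===== PORT A =====
-- A's loop body: one character step on the state (inputs, outputs, temp, inputTag)
def stepA (st : List String × List String × List Char × Bool) (c : Char) :
    List String × List String × List Char × Bool :=
  -- if temp == "inputwire": inputTag = True; temp = ""
  let t1 : List Char × Bool :=
    if st.2.2.1 = "inputwire".toList then ([], true) else (st.2.2.1, st.2.2.2)
  -- if temp == "outputreg": inputTag = False; temp = ""
  let t2 : List Char × Bool :=
    if t1.1 = "outputreg".toList then ([], false) else t1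
  -- if char == ',': append temp to inputs (tag True) / outputs (tag False); temp = ""
  let io : List String × List String × List Char :=
    if c = ',' then
      if t2.2 then (st.1 ++ [String.ofList t2.1], st.2.1, [])
      else (st.1, st.2.1 ++ [String.ofList t2.1], [])
    else (st.1, st.2.1, t2.1)
  -- if char not in ' \n\t,': temp = temp + char
  let t3 : List Char :=
    if c ≠ ' ' ∧ c ≠ '\n' ∧ c ≠ '\t' ∧ c ≠ ',' then io.2.2 ++ [c] else io.2.2
  -- if char == ']': temp = temp + " "
  let t4 : List Char := if c = ']' then t3 ++ [' '] else t3
  (io.1, io.2.1, t4, t2.2)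

def getInputsAndOutputs (portlist : String) : List (List String) :=
  -- 'for char in portlist + ","' — fold over the characters of portlist followed by ','
  let st := (portlist.toList ++ [',']).foldl stepA ([], [], [], true)
  [st.1, st.2.1]

-- ===== PORT B =====
-- B's inner loop body: one character of a segment, state (temp, inputTag)
def stepCharB (tt : List Char × Bool) (c : Char) : List Char × Bool :=
  let t1 := if tt.1 = "inputwire".toList then (([] : List Char), true) else tt
  let t2 := if t1.1 = "outputreg".toList then (([] : List Char), false) else t1
  let t3 := if c ≠ ' ' ∧ c ≠ '\n' ∧ c ≠ '\t' then t2.1 ++ [c] else t2.1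
  let t4 := if c = ']' then t3 ++ [' '] else t3
  (t4, t2.2)

-- B's outer loop body: one comma-terminated segment, state (inputs, outputs, inputTag)
def stepSegB (st : List String × List String × Bool) (seg : List Char) :
    List String × List String × Bool :=
  let x := seg.foldl stepCharB ([], st.2.2)
  -- the terminating comma of this segment triggers the reset check too
  let t1 := if x.1 = "inputwire".toList then (([] : List Char), true) else x
  let t2 := if t1.1 = "outputreg".toList then (([] : List Char), false) else t1
  if t2.2 then (st.1 ++ [String.ofList t2.1], st.2.1, t2.2)
  else (st.1, st.2.1 ++ [String.ofList t2.1], t2.2)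

def getInputsAndOutputs_alt (portlist : String) : List (List String) :=
  let st := (PySem.Chars.splitOn portlist.toList [',']).foldl stepSegB ([], [], true)
  [st.1, st.2.1]

-- ===== PRECONDITION & SPEC =====
def Spec_getInputsAndOutputs (portlist : String) (out : List (List String)) : Prop := out = getInputsAndOutputs_alt portlist
instance (portlist : String) (out : List (List String)) : Decidable (Spec_getInputsAndOutputs portlist out) := by unfold Spec_getInputsAndOutputs; infer_instance

-- ===== CLAIM (what is proved, stated in full; the proofs are below) =====
def Claim_equal_getInputsAndOutputs : Prop := ∀ (portlist : String), Dom_getInputsAndOutputs portlist → Spec_getInputsAndOutputs portlist (getInputsAndOutputs portlist)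

-- ===== LEMMAS AND PROOFS =====


-- proof-side recursive characterization of splitting on ',' (pre = chars of the current
-- segment consumed so far)
def mySplit (pre : List Char) : List Char → List (List Char)
  | [] => [pre]
  | c :: rest => if c = ',' then pre :: mySplit [] rest else mySplit (pre ++ [c]) rest

lemma splitOn_go_spec : ∀ (fuel : Nat) (l cur : List Char) (acc : List (List Char)),
    l.length < fuel →
    PySem.Chars.splitOn.go [','] fuel l cur acc = acc.reverse ++ mySplit cur.reverse l := by
  intro fuel
  induction fuel with
  | zero => intro l cur acc h; omega
  | succ n ih =>
    intro l cur acc h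
    cases l with
    | nil => simp [PySem.Chars.splitOn.go, mySplit]
    | cons c rest =>
      by_cases hc : c = ','
      · subst hc
        rw [show PySem.Chars.splitOn.go [','] (n+1) (',' :: rest) cur acc
              = PySem.Chars.splitOn.go [','] n rest [] (cur.reverse :: acc) by
            simp [PySem.Chars.splitOn.go, List.isPrefixOf]]
        rw [ih rest [] (cur.reverse :: acc) (by simpa using Nat.lt_of_succ_lt_succ h)]
        simp [mySplit]
      · rw [show PySem.Chars.splitOn.go [','] (n+1) (c :: rest) cur acc
              = PySem.Chars.splitOn.go [','] n rest (c :: cur) acc by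
            simp [PySem.Chars.splitOn.go, List.isPrefixOf, Ne.symm hc]]
        rw [ih rest (c :: cur) acc (by simpa using Nat.lt_of_succ_lt_succ h)]
        simp [mySplit, hc]

lemma splitOn_eq_mySplit (s : List Char) :
    PySem.Chars.splitOn s [','] = mySplit [] s := by
  have := splitOn_go_spec (s.length + 1) s [] [] (by omega)
  simpa [PySem.Chars.splitOn] using this

-- A's step on a non-comma character only touches (temp, tag), exactly as B's inner step
lemma stepA_ne_comma (ins outs : List String) (temp : List Char) (tag : Bool)
    (c : Char) (hc : c ≠ ',') :
    stepA (ins, outs, temp, tag) c =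
      (ins, outs, (stepCharB (temp, tag) c).1, (stepCharB (temp, tag) c).2) := by
  simp only [stepA, stepCharB, hc, if_false]
  split_ifs <;> simp_all

-- main invariant: A over (cs ++ [',']) from a mid-segment state equals B over the segments
lemma mainA (cs : List Char) : ∀ (pre : List Char) (ins outs : List String) (tag0 : Bool),
    List.foldl stepA
      (ins, outs, (List.foldl stepCharB ([], tag0) pre).1, (List.foldl stepCharB ([], tag0) pre).2)
      (cs ++ [','])
    = (((mySplit pre cs).foldl stepSegB (ins, outs, tag0)).1,
       ((mySplit pre cs).foldl stepSegB (ins, outs, tag0)).2.1,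
       [],
       ((mySplit pre cs).foldl stepSegB (ins, outs, tag0)).2.2) := by
  induction cs with
  | nil =>
    intro pre ins outs tag0
    simp only [List.nil_append, List.foldl_cons, List.foldl_nil, mySplit]
    simp only [stepA, stepSegB]
    split_ifs <;> simp_all
  | cons c rest ih =>
    intro pre ins outs tag0
    by_cases hc : c = ','
    · subst hc
      simp only [List.cons_append, List.foldl_cons]
      rw [show stepA (ins, outs, (List.foldl stepCharB ([], tag0) pre).1,
            (List.foldl stepCharB ([], tag0) pre).2) ','
          = ((stepSegB (ins, outs, tag0) pre).1, (stepSegB (ins, outs, tag0) pre).2.1,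
             ([] : List Char), (stepSegB (ins, outs, tag0) pre).2.2) by
        clear ih
        generalize hX : List.foldl stepCharB ([], tag0) pre = X
        obtain ⟨temp, tag⟩ := X
        simp only [stepA, stepSegB, hX]
        split_ifs <;> simp_all]
      have := ih [] (stepSegB (ins, outs, tag0) pre).1 (stepSegB (ins, outs, tag0) pre).2.1
        (stepSegB (ins, outs, tag0) pre).2.2
      simp only [List.foldl_nil] at this
      rw [this]
      simp [mySplit]
    · simp only [List.cons_append, List.foldl_cons]
      rw [stepA_ne_comma _ _ _ _ _ hc]
      have hx : stepCharB (List.foldl stepCharB ([], tag0) pre) c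
          = List.foldl stepCharB ([], tag0) (pre ++ [c]) := by
        simp
      have := ih (pre ++ [c]) ins outs tag0
      simp only [mySplit, hc] at this ⊢
      rw [show ((stepCharB (List.foldl stepCharB ([], tag0) pre) c).1,
            (stepCharB (List.foldl stepCharB ([], tag0) pre) c).2)
          = stepCharB (List.foldl stepCharB ([], tag0) pre) c by rfl]
      rw [hx]
      exact this

-- ===== VERDICT (by name: the statement is the Claim_ definition above) =====
theorem getInputsAndOutputs_spec : Claim_equal_getInputsAndOutputs := by
  intro portlist _
  unfold Spec_getInputsAndOutputs getInputsAndOutputs getInputsAndOutputs_alt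
  rw [splitOn_eq_mySplit]
  have := mainA portlist.toList [] [] [] true
  simp only [List.foldl_nil] at this
  rw [this]
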